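-- pv_equiv track=rewrite | github.com/Seanaaa0/GPT-CoT | source/generate_label.py | generate_cot_and_label
-- ===== SOURCE A (Python) =====
-- def generate_cot_and_label(start, goal, actions, grid_size):
--     x, y = start
--     visited = set()
--     visited.add(start)
--     steps = [f"Start at {start}"]
--     out_of_bound = False
--     loop_detected = False
--
--     for i, (dx, dy) in enumerate(actions):
--         x += dx
--         y += dy
--         steps.append(f"Step {i+1}: move ({dx},{dy}) → ({x},{y})")
--
--         if not (0 <= x < grid_size and 0 <= y < grid_size):
--             out_of_bound = True
--         elif (x, y) in visited:
--             loop_detected = True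
--         else:
--             visited.add((x, y))
--
--     steps.append(f"Final position: ({x},{y})")
--
--     # 判斷 label 類型
--     if out_of_bound:
--         label = "out of bound"
--     elif (x, y) == goal:
--         label = "correct"
--     elif (x, y) != goal:
--         dx = x - goal[0]
--         dy = y - goal[1]
--         if (abs(dx) + abs(dy)) < len(actions):
--             label = "too long"
--         elif (abs(dx) + abs(dy)) > len(actions):
--             label = "too short"
--         elif loop_detected:
--             label = "loop"
--         else:
--             label = "wrong"
--     else:
--         label = "unknown"
--
--     return "\n".join(steps), label
-- ===== SOURCE B (Python) =====
-- def generate_cot_and_label(start, goal, actions, grid_size):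
--     # Build the full path first, then derive trace text and flags from it.
--     positions = [start]
--     x, y = start
--     for dx, dy in actions:
--         x += dx
--         y += dy
--         positions.append((x, y))
--
--     lines = [f"Start at {start}"] + [
--         f"Step {i+1}: move ({dx},{dy}) → ({px},{py})"
--         for i, ((dx, dy), (px, py)) in enumerate(zip(actions, positions[1:]))
--     ]
--     fx, fy = positions[-1]
--     lines.append(f"Final position: ({fx},{fy})")
--
--     out_of_bound = any(not (0 <= px < grid_size and 0 <= py < grid_size)
--                        for px, py in positions[1:])
--     loop_detected = len(set(positions)) != len(positions)
--
--     if out_of_bound: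
--         label = "out of bound"
--     elif (fx, fy) == goal:
--         label = "correct"
--     else:
--         dist = abs(fx - goal[0]) + abs(fy - goal[1])
--         if dist < len(actions):
--             label = "too long"
--         elif dist > len(actions):
--             label = "too short"
--         elif loop_detected:
--             label = "loop"
--         else:
--             label = "wrong"
--     return "\n".join(lines), label
-- ===== Notes on version B (the rewrite author's own statement) =====
-- stated objective: alternative
-- what changed: B builds the complete list of visited positions first and then derives the trace lines by mapping over it, the out-of-bound flag with any(), and the loop flag by comparing len(set(positions)) to len(positions), replacing A's single stateful walk that threads a visited-set and two sticky flags through the loop.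
import Mathlib
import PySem

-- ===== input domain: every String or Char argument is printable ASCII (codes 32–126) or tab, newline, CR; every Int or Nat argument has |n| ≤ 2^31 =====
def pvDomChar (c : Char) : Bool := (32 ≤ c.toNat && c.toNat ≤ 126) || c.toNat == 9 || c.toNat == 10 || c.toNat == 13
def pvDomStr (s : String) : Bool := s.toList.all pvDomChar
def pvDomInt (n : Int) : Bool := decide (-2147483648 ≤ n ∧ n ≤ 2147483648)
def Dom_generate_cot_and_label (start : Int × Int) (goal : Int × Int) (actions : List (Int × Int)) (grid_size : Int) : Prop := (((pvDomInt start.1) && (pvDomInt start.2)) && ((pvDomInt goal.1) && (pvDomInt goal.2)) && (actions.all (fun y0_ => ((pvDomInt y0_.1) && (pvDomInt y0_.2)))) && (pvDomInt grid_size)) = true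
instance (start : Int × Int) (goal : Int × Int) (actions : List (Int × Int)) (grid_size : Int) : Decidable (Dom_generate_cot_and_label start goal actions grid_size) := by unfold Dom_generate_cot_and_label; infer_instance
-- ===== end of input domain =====

-- B builds the whole position path first and derives the trace text and the two flags from it,
-- instead of A's single stateful walk; objective: alternative decomposition (same cost).

-- shared f-string formatting helpers (identical literal formats in A and B)
def pvStartLine (start : Int × Int) : String :=
  "Start at (" ++ PySem.Int.toStr start.1 ++ ", " ++ PySem.Int.toStr start.2 ++ ")"

def pvStepLine (i dx dy x y : Int) : String :=
  "Step " ++ PySem.Int.toStr (i + 1) ++ ": move (" ++ PySem.Int.toStr dx ++ "," ++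
    PySem.Int.toStr dy ++ ") → (" ++ PySem.Int.toStr x ++ "," ++ PySem.Int.toStr y ++ ")"

def pvFinalLine (x y : Int) : String :=
  "Final position: (" ++ PySem.Int.toStr x ++ "," ++ PySem.Int.toStr y ++ ")"

-- ===== PORT A =====
-- the for-loop of A: state (x, y, visited, steps, out_of_bound, loop_detected)
def pvLoopA (gs : Int) : List (Int × Int) → Int → Int → Int → PySem.Set (Int × Int) →
    List String → Bool → Bool → Int × Int × PySem.Set (Int × Int) × List String × Bool × Bool
  | [], _, x, y, v, steps, oob, lp => (x, y, v, steps, oob, lp)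
  | (dx, dy) :: rest, i, x, y, v, steps, oob, lp =>
      let x' := x + dx
      let y' := y + dy
      let steps' := steps ++ [pvStepLine i dx dy x' y']
      if ¬ (0 ≤ x' ∧ x' < gs ∧ 0 ≤ y' ∧ y' < gs) then
        pvLoopA gs rest (i + 1) x' y' v steps' true lp
      else if PySem.Set.contains v (x', y') then
        pvLoopA gs rest (i + 1) x' y' v steps' oob true
      else
        pvLoopA gs rest (i + 1) x' y' (PySem.Set.add v (x', y')) steps' oob lp

def generate_cot_and_label (start : Int × Int) (goal : Int × Int) (actions : List (Int × Int)) (grid_size : Int) : String × String :=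
  let visited : PySem.Set (Int × Int) := PySem.Set.add PySem.Set.empty start
  let st := pvLoopA grid_size actions 0 start.1 start.2 visited [pvStartLine start] false false
  let fx := st.1
  let fy := st.2.1
  let steps := st.2.2.2.1 ++ [pvFinalLine fx fy]
  let label :=
    if st.2.2.2.2.1 then "out of bound"
    else if (fx, fy) = goal then "correct"
    else if (fx, fy) ≠ goal then
      let dx := fx - goal.1
      let dy := fy - goal.2
      if |dx| + |dy| < (actions.length : Int) then "too long"
      else if |dx| + |dy| > (actions.length : Int) then "too short"
      else if st.2.2.2.2.2 then "loop"
      else "wrong"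
    else "unknown"
  (PySem.Str.join "\n" steps, label)

-- ===== PORT B =====
-- the path-building loop of B: positions after start
def pvPath : Int → Int → List (Int × Int) → List (Int × Int)
  | _, _, [] => []
  | x, y, (dx, dy) :: rest => (x + dx, y + dy) :: pvPath (x + dx) (y + dy) rest

def generate_cot_and_label_alt (start : Int × Int) (goal : Int × Int) (actions : List (Int × Int)) (grid_size : Int) : String × String :=
  let path := pvPath start.1 start.2 actions
  let positions := start :: path
  let lines := pvStartLine start ::
    (PySem.List.enumerate (actions.zip path) 0).map
      (fun p => pvStepLine p.1 p.2.1.1 p.2.1.2 p.2.2.1 p.2.2.2)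
  let fin := path.getLastD start
  let allLines := lines ++ [pvFinalLine fin.1 fin.2]
  let oob := path.any (fun p => !(decide (0 ≤ p.1 ∧ p.1 < grid_size ∧ 0 ≤ p.2 ∧ p.2 < grid_size)))
  let lp := (PySem.Set.ofList positions).length ≠ positions.length
  let label :=
    if oob then "out of bound"
    else if fin = goal then "correct"
    else
      let dist := |fin.1 - goal.1| + |fin.2 - goal.2|
      if dist < (actions.length : Int) then "too long"
      else if dist > (actions.length : Int) then "too short"
      else if lp then "loop"
      else "wrong"
  (PySem.Str.join "\n" allLines, label)

-- ===== PRECONDITION & SPEC =====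
def Spec_generate_cot_and_label (start : Int × Int) (goal : Int × Int) (actions : List (Int × Int)) (grid_size : Int) (out : String × String) : Prop := out = generate_cot_and_label_alt start goal actions grid_size
instance (start : Int × Int) (goal : Int × Int) (actions : List (Int × Int)) (grid_size : Int) (out : String × String) : Decidable (Spec_generate_cot_and_label start goal actions grid_size out) := by unfold Spec_generate_cot_and_label; infer_instance

-- ===== CLAIM (what is proved, stated in full; the proofs are below) =====
def Claim_equal_generate_cot_and_label : Prop := ∀ (start : Int × Int) (goal : Int × Int) (actions : List (Int × Int)) (grid_size : Int), Dom_generate_cot_and_label start goal actions grid_size → Spec_generate_cot_and_label start goal actions grid_size (generate_cot_and_label start goal actions grid_size)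

-- ===== LEMMAS AND PROOFS =====

-- proof-side helpers: the step lines of a suffix, and "A's loop flag ever fires" on a suffix
def pvStepLines (i x y : Int) : List (Int × Int) → List String
  | [] => []
  | (dx, dy) :: rest => pvStepLine i dx dy (x + dx) (y + dy) :: pvStepLines (i + 1) (x + dx) (y + dy) rest

def pvDup (v : PySem.Set (Int × Int)) (x y : Int) : List (Int × Int) → Bool
  | [] => false
  | (dx, dy) :: rest =>
      if PySem.Set.contains v (x + dx, y + dy) then true
      else pvDup (PySem.Set.add v (x + dx, y + dy)) (x + dx) (y + dy) rest

theorem pvLoopA_cons (gs dx dy : Int) (rest : List (Int × Int)) (i x y : Int)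
    (v : PySem.Set (Int × Int)) (steps : List String) (oob lp : Bool) :
    pvLoopA gs ((dx, dy) :: rest) i x y v steps oob lp =
      (if ¬ (0 ≤ x + dx ∧ x + dx < gs ∧ 0 ≤ y + dy ∧ y + dy < gs) then
        pvLoopA gs rest (i + 1) (x + dx) (y + dy) v (steps ++ [pvStepLine i dx dy (x + dx) (y + dy)]) true lp
      else if PySem.Set.contains v (x + dx, y + dy) then
        pvLoopA gs rest (i + 1) (x + dx) (y + dy) v (steps ++ [pvStepLine i dx dy (x + dx) (y + dy)]) oob true
      else
        pvLoopA gs rest (i + 1) (x + dx) (y + dy) (PySem.Set.add v (x + dx, y + dy)) (steps ++ [pvStepLine i dx dy (x + dx) (y + dy)]) oob lp) := rfl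

theorem pvLoopA_main (gs : Int) (acts : List (Int × Int)) :
    ∀ (i x y : Int) (v : PySem.Set (Int × Int)) (steps : List String) (oob lp : Bool),
    ∃ v' lp', pvLoopA gs acts i x y v steps oob lp =
      (((pvPath x y acts).getLastD (x, y)).1,
       ((pvPath x y acts).getLastD (x, y)).2,
       v',
       steps ++ pvStepLines i x y acts,
       oob || (pvPath x y acts).any (fun p => !(decide (0 ≤ p.1 ∧ p.1 < gs ∧ 0 ≤ p.2 ∧ p.2 < gs))),
       lp') := by
  induction acts with
  | nil => intro i x y v steps oob lp; exact ⟨v, lp, by simp [pvLoopA, pvPath, pvStepLines]⟩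
  | cons a rest ih =>
      intro i x y v steps oob lp
      obtain ⟨dx, dy⟩ := a
      rw [pvLoopA_cons]
      by_cases hb : (0 ≤ x + dx ∧ x + dx < gs ∧ 0 ≤ y + dy ∧ y + dy < gs)
      · rw [if_neg (not_not_intro hb)]
        have hd : (!(decide (0 ≤ x + dx ∧ x + dx < gs ∧ 0 ≤ y + dy ∧ y + dy < gs))) = false := by
          simp [hb]
        by_cases hc : PySem.Set.contains v (x + dx, y + dy) = true
        · rw [if_pos hc]
          obtain ⟨v', lp', h⟩ := ih (i + 1) (x + dx) (y + dy) v (steps ++ [pvStepLine i dx dy (x + dx) (y + dy)]) oob true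
          refine ⟨v', lp', ?_⟩
          rw [h]
          simp only [pvPath, pvStepLines, List.getLastD_cons, List.any_cons, hd,
            List.append_assoc, List.singleton_append, Bool.false_or]
        · rw [if_neg hc]
          obtain ⟨v', lp', h⟩ := ih (i + 1) (x + dx) (y + dy) (PySem.Set.add v (x + dx, y + dy)) (steps ++ [pvStepLine i dx dy (x + dx) (y + dy)]) oob lp
          refine ⟨v', lp', ?_⟩
          rw [h]
          simp only [pvPath, pvStepLines, List.getLastD_cons, List.any_cons, hd,
            List.append_assoc, List.singleton_append, Bool.false_or]
      · rw [if_pos hb]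
        have hd : (!(decide (0 ≤ x + dx ∧ x + dx < gs ∧ 0 ≤ y + dy ∧ y + dy < gs))) = true := by
          simp [hb]
        obtain ⟨v', lp', h⟩ := ih (i + 1) (x + dx) (y + dy) v (steps ++ [pvStepLine i dx dy (x + dx) (y + dy)]) true lp
        refine ⟨v', lp', ?_⟩
        rw [h]
        simp only [pvPath, pvStepLines, List.getLastD_cons, List.any_cons, hd,
          List.append_assoc, List.singleton_append, Bool.true_or, Bool.or_true]

theorem pvLoopA_loop_mono (gs : Int) (acts : List (Int × Int)) :
    ∀ (i x y : Int) (v : PySem.Set (Int × Int)) (steps : List String) (oob : Bool),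
    (pvLoopA gs acts i x y v steps oob true).2.2.2.2.2 = true := by
  induction acts with
  | nil => intro i x y v steps oob; simp [pvLoopA]
  | cons a rest ih =>
      intro i x y v steps oob
      obtain ⟨dx, dy⟩ := a
      rw [pvLoopA_cons]
      by_cases hb : (0 ≤ x + dx ∧ x + dx < gs ∧ 0 ≤ y + dy ∧ y + dy < gs)
      · rw [if_neg (not_not_intro hb)]
        by_cases hc : PySem.Set.contains v (x + dx, y + dy) = true
        · rw [if_pos hc]; exact ih _ _ _ _ _ _
        · rw [if_neg hc]; exact ih _ _ _ _ _ _
      · rw [if_pos hb]; exact ih _ _ _ _ _ _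

theorem pvLoopA_loop (gs : Int) (acts : List (Int × Int)) :
    ∀ (i x y : Int) (v : PySem.Set (Int × Int)) (steps : List String) (oob lp : Bool),
    (pvPath x y acts).any (fun p => !(decide (0 ≤ p.1 ∧ p.1 < gs ∧ 0 ≤ p.2 ∧ p.2 < gs))) = false →
    (pvLoopA gs acts i x y v steps oob lp).2.2.2.2.2 = (lp || pvDup v x y acts) := by
  induction acts with
  | nil => intro i x y v steps oob lp _; simp [pvLoopA, pvDup]
  | cons a rest ih =>
      intro i x y v steps oob lp hno
      obtain ⟨dx, dy⟩ := a
      simp only [pvPath, List.any_cons, Bool.or_eq_false_iff] at hno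
      obtain ⟨h1, h2⟩ := hno
      have hb : (0 ≤ x + dx ∧ x + dx < gs ∧ 0 ≤ y + dy ∧ y + dy < gs) := by
        by_contra h; simp [h] at h1
      rw [pvLoopA_cons, if_neg (not_not_intro hb)]
      by_cases hc : PySem.Set.contains v (x + dx, y + dy) = true
      · rw [if_pos hc]
        simp only [pvDup, hc, if_true, Bool.or_true]
        exact pvLoopA_loop_mono gs rest _ _ _ _ _ _
      · rw [if_neg hc]
        simp only [pvDup, hc, Bool.false_eq_true, if_false]
        exact ih _ _ _ _ _ _ _ h2

theorem pvDup_spec (acts : List (Int × Int)) :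
    ∀ (v : PySem.Set (Int × Int)) (x y : Int), v.Nodup →
    (pvDup v x y acts = true ↔ ¬ (v ++ pvPath x y acts).Nodup) := by
  induction acts with
  | nil => intro v x y hv; simp [pvDup, pvPath, hv]
  | cons a rest ih =>
      intro v x y hv
      obtain ⟨dx, dy⟩ := a
      by_cases hm : (x + dx, y + dy) ∈ v
      · have hc : PySem.Set.contains v (x + dx, y + dy) = true :=
          (PySem.Set.contains_iff v _).mpr hm
        simp only [pvDup, pvPath, hc, if_true, true_iff]
        intro hnd
        rw [List.nodup_append] at hnd
        exact hnd.2.2 _ hm _ List.mem_cons_self rfl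
      · have hc : PySem.Set.contains v (x + dx, y + dy) = false := by
          cases h : PySem.Set.contains v (x + dx, y + dy)
          · rfl
          · exact absurd ((PySem.Set.contains_iff v _).mp h) hm
        have hadd : PySem.Set.add v (x + dx, y + dy) = v ++ [(x + dx, y + dy)] := by
          simp only [PySem.Set.add]
          rw [if_neg (by simpa using hm)]
        have hnd2 : (v ++ [(x + dx, y + dy)]).Nodup := by
          rw [List.nodup_append]
          refine ⟨hv, List.nodup_singleton _, ?_⟩
          intro p hp q hq
          rw [List.mem_singleton] at hq
          subst hq
          intro hpq
          exact hm (hpq ▸ hp)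
        simp only [pvDup, pvPath, hc, Bool.false_eq_true, if_false]
        rw [hadd, ih _ _ _ hnd2, List.append_assoc, List.singleton_append]

theorem pvFoldlAdd_le (l : List (Int × Int)) :
    ∀ (s : PySem.Set (Int × Int)), (l.foldl PySem.Set.add s).length ≤ s.length + l.length := by
  induction l with
  | nil => intro s; simp
  | cons a rest ih =>
      intro s
      have hlen : (PySem.Set.add s a).length ≤ s.length + 1 := by
        by_cases hc : PySem.Set.contains s a = true
        · simp only [PySem.Set.add]; rw [if_pos hc]; omega
        · simp only [PySem.Set.add]; rw [if_neg hc]; simp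
      calc ((a :: rest).foldl PySem.Set.add s).length
          = (rest.foldl PySem.Set.add (PySem.Set.add s a)).length := rfl
        _ ≤ (PySem.Set.add s a).length + rest.length := ih _
        _ ≤ s.length + (a :: rest).length := by simp only [List.length_cons]; omega

theorem pvFoldlAdd_len (l : List (Int × Int)) :
    ∀ (s : PySem.Set (Int × Int)), s.Nodup →
    ((l.foldl PySem.Set.add s).length = s.length + l.length ↔ (s ++ l).Nodup) := by
  induction l with
  | nil => intro s hs; simp [hs]
  | cons a rest ih =>
      intro s hs
      by_cases hm : a ∈ s
      · have hc : PySem.Set.contains s a = true := (PySem.Set.contains_iff s a).mpr hm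
        have hadd : PySem.Set.add s a = s := by
          simp only [PySem.Set.add]; rw [if_pos hc]
        have hle := pvFoldlAdd_le rest s
        constructor
        · intro h
          exfalso
          rw [show (a :: rest).foldl PySem.Set.add s = rest.foldl PySem.Set.add s from by rw [List.foldl_cons, hadd]] at h
          simp only [List.length_cons] at h
          omega
        · intro h
          exfalso
          rw [List.nodup_append] at h
          exact h.2.2 _ hm _ List.mem_cons_self rfl
      · have hc : PySem.Set.contains s a = false := by
          cases h : PySem.Set.contains s a
          · rfl
          · exact absurd ((PySem.Set.contains_iff s a).mp h) hm
        have hadd : PySem.Set.add s a = s ++ [a] := by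
          simp only [PySem.Set.add]
          rw [if_neg (by simpa using hm)]
        have hnd2 : (s ++ [a]).Nodup := by
          rw [List.nodup_append]
          refine ⟨hs, List.nodup_singleton _, ?_⟩
          intro p hp q hq
          rw [List.mem_singleton] at hq
          subst hq
          intro hpq
          exact hm (hpq ▸ hp)
        have hiff := ih (s ++ [a]) hnd2
        rw [List.foldl_cons, hadd,
          show s ++ a :: rest = (s ++ [a]) ++ rest from by simp, ← hiff]
        have hL : (s ++ [a]).length = s.length + 1 := by simp
        simp only [List.length_cons, hL]
        constructor <;> intro h <;> omega

theorem pvOfList_len (l : List (Int × Int)) :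
    ((PySem.Set.ofList l).length = l.length) ↔ l.Nodup := by
  have h := pvFoldlAdd_len l [] (by simp)
  simpa using h

theorem pvEnumZip (acts : List (Int × Int)) :
    ∀ (x y i : Int),
    (PySem.List.enumerate (acts.zip (pvPath x y acts)) i).map
      (fun p => pvStepLine p.1 p.2.1.1 p.2.1.2 p.2.2.1 p.2.2.2) = pvStepLines i x y acts := by
  induction acts with
  | nil => intro x y i; simp [pvPath, pvStepLines, PySem.List.enumerate_nil]
  | cons a rest ih =>
      intro x y i
      obtain ⟨dx, dy⟩ := a
      simp [pvPath, List.zip_cons_cons, PySem.List.enumerate_cons, pvStepLines, ih]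

-- ===== VERDICT (by name: the statement is the Claim_ definition above) =====
theorem generate_cot_and_label_spec : Claim_equal_generate_cot_and_label := by
  intro start goal actions gs _hdom
  unfold Spec_generate_cot_and_label
  unfold generate_cot_and_label generate_cot_and_label_alt
  obtain ⟨v', lp', h⟩ := pvLoopA_main gs actions 0 start.1 start.2
    (PySem.Set.add PySem.Set.empty start) [pvStartLine start] false false
  have hv0 : PySem.Set.add PySem.Set.empty start = [start] := rfl
  simp only [h, pvEnumZip, Bool.false_or, Prod.mk.eta, List.singleton_append]
  by_cases hoob : (pvPath start.1 start.2 actions).any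
      (fun p => !(decide (0 ≤ p.1 ∧ p.1 < gs ∧ 0 ≤ p.2 ∧ p.2 < gs))) = true
  · rw [hoob]; rfl
  · have hoob' : (pvPath start.1 start.2 actions).any
        (fun p => !(decide (0 ≤ p.1 ∧ p.1 < gs ∧ 0 ≤ p.2 ∧ p.2 < gs))) = false :=
      Bool.eq_false_iff.mpr hoob
    have hlp := pvLoopA_loop gs actions 0 start.1 start.2
      (PySem.Set.add PySem.Set.empty start) [pvStartLine start] false false hoob'
    rw [h] at hlp
    simp only [Bool.false_or] at hlp
    rw [hv0] at hlp
    have hdup := pvDup_spec actions [start] start.1 start.2 (List.nodup_singleton _)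
    have hlen := pvOfList_len (start :: pvPath start.1 start.2 actions)
    rw [hoob']
    by_cases hg : (pvPath start.1 start.2 actions).getLast?.getD start = goal
    · simp [hg]
    · by_cases hnd : (start :: pvPath start.1 start.2 actions).Nodup
      · have hA : lp' = false := by
          rw [hlp]
          rcases Bool.eq_false_or_eq_true (pvDup [start] start.1 start.2 actions) with hh | hh
          · exact absurd hnd (by simpa using hdup.mp hh)
          · exact hh
        have hB : (PySem.Set.ofList (start :: pvPath start.1 start.2 actions)).length =
            (start :: pvPath start.1 start.2 actions).length := hlen.mpr hnd
        have hB2 : (PySem.Set.ofList (start :: pvPath start.1 start.2 actions)).length =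
            (pvPath start.1 start.2 actions).length + 1 := by simpa using hB
        simp [hg, hA, hB2]
      · have hA : lp' = true := by
          rw [hlp]
          exact hdup.mpr (by simpa using hnd)
        have hB : ¬ (PySem.Set.ofList (start :: pvPath start.1 start.2 actions)).length =
            (start :: pvPath start.1 start.2 actions).length := fun hh => hnd (hlen.mp hh)
        have hB2 : ¬ (PySem.Set.ofList (start :: pvPath start.1 start.2 actions)).length =
            (pvPath start.1 start.2 actions).length + 1 := by simpa using hB
        simp [hg, hA, hB2]
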